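-- pv_equiv track=rewrite | github.com/shivyelave/DSA_Python | Set_DSA/5_remove_all_item_present_in_other_Set.py | remove_all_item_present_in_other_set
-- ===== SOURCE A (Python) =====
-- def remove_all_item_present_in_other_set(set1, set2):
--     """
--     Description:
--     Function to remove all items from set1 that are present in set2.
--
--     Parameters:
--     set1 (set): The set from which items will be removed.
--     set2 (set): The set containing items to be removed from set1.
--
--     Returns:
--     set: The updated set1 after removing items present in set2.
--     """
--     temp = set()
--     for item in set1:
--         if item in set2:
--             temp.add(item)
--     for item in temp:
--         set1.remove(item)
--     return set1
-- ===== SOURCE B (Python) =====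
-- def remove_all_item_present_in_other_set(set1, set2):
--     """Remove from set1 every item present in set2; returns the same set1 (mutated in place)."""
--     for item in set2:
--         set1.discard(item)
--     return set1
-- ===== Notes on version B (the rewrite author's own statement) =====
-- stated objective: simpler
-- what changed: Drops A's two-phase structure (scan set1 building a temp set of common items, then remove each) for a single loop over set2 that discards each item from set1 directly.
import Mathlib
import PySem

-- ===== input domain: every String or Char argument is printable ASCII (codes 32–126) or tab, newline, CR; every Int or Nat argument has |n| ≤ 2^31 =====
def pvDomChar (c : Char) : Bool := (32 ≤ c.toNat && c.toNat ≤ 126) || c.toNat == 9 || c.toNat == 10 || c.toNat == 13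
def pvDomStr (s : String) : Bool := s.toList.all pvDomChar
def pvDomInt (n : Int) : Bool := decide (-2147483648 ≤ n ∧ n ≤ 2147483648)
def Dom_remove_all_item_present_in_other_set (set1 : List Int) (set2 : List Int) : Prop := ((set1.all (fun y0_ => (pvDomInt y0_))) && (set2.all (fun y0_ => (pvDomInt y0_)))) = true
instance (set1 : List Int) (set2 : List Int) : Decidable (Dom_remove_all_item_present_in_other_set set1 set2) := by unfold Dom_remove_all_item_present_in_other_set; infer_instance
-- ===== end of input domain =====

-- B replaces A's two-pass scheme (collect common items into a temp set, then remove each) by a single loop discarding each set2 item from set1; equivalence is about the returned value (both Pythons mutate set1 in place).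


-- ===== PORT A =====
-- Port of A: build temp = items of set1 also in set2, then remove each temp item from set1.
-- Python's set1.remove(item) never raises here (each temp item is still present when removed),
-- so the `.getD set1` fallback of remove? is never taken.
def remove_all_item_present_in_other_set (set1 : List Int) (set2 : List Int) : List Int :=
  let temp : PySem.Set Int :=
    set1.foldl (fun t item => if PySem.Set.contains set2 item then PySem.Set.add t item else t)
      PySem.Set.empty
  temp.foldl (fun s item => (PySem.Set.remove? s item).getD s) set1

-- ===== PORT B =====
-- Port of B: one loop over set2, discarding each item from set1.
def remove_all_item_present_in_other_set_alt (set1 : List Int) (set2 : List Int) : List Int :=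
  set2.foldl (fun s item => PySem.Set.discard s item) set1

-- ===== PRECONDITION & SPEC =====
def Spec_remove_all_item_present_in_other_set (set1 : List Int) (set2 : List Int) (out : List Int) : Prop := out = remove_all_item_present_in_other_set_alt set1 set2
instance (set1 : List Int) (set2 : List Int) (out : List Int) : Decidable (Spec_remove_all_item_present_in_other_set set1 set2 out) := by unfold Spec_remove_all_item_present_in_other_set; infer_instance

-- ===== CLAIM (what is proved, stated in full; the proofs are below) =====
def Claim_equal_remove_all_item_present_in_other_set : Prop := ∀ (set1 : List Int) (set2 : List Int), Dom_remove_all_item_present_in_other_set set1 set2 → Spec_remove_all_item_present_in_other_set set1 set2 (remove_all_item_present_in_other_set set1 set2)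

-- ===== LEMMAS AND PROOFS =====

theorem removeD_eq_discard (s : List Int) (x : Int) :
    (PySem.Set.remove? s x).getD s = PySem.Set.discard s x := by
  unfold PySem.Set.remove?
  split
  · rfl
  · rename_i h
    have hx : x ∉ s := fun hm => h ((PySem.Set.contains_iff _ _).mpr hm)
    symm
    simp only [PySem.Set.discard]
    apply List.filter_eq_self.mpr
    intro y hy
    simp only [Bool.not_eq_true', beq_eq_false_iff_ne, ne_eq]
    rintro rfl; exact hx hy

theorem foldl_removeD (l s : List Int) :
    l.foldl (fun s x => (PySem.Set.remove? s x).getD s) s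
      = s.filter (fun y => !l.contains y) := by
  induction l generalizing s with
  | nil => simp
  | cons a l ih =>
    simp only [List.foldl_cons]
    rw [removeD_eq_discard s a, ih]
    simp only [PySem.Set.discard, List.filter_filter]
    apply List.filter_congr
    intro y _
    simp [Bool.and_comm, beq_eq_decide]

theorem foldl_discard (l s : List Int) :
    l.foldl (fun s x => PySem.Set.discard s x) s
      = s.filter (fun y => !l.contains y) := by
  induction l generalizing s with
  | nil => simp
  | cons a l ih =>
    simp only [List.foldl_cons]
    rw [ih]
    simp only [PySem.Set.discard, List.filter_filter]
    apply List.filter_congr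
    intro y _
    simp [Bool.and_comm, beq_eq_decide]

theorem mem_tempFold (set1 set2 t0 : List Int) (y : Int) :
    (y ∈ set1.foldl
        (fun t item => if PySem.Set.contains set2 item then PySem.Set.add t item else t) t0)
      ↔ y ∈ t0 ∨ (y ∈ set1 ∧ y ∈ set2) := by
  induction set1 generalizing t0 with
  | nil => simp
  | cons a l ih =>
    simp only [List.foldl_cons]
    rw [ih]
    by_cases h : PySem.Set.contains set2 a = true
    · simp only [h, if_true, PySem.Set.mem_add]
      have ha : a ∈ set2 := (PySem.Set.contains_iff _ _).mp h
      constructor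
      · rintro ((hy | rfl) | hy)
        · exact Or.inl hy
        · exact Or.inr ⟨List.mem_cons_self, ha⟩
        · exact Or.inr ⟨List.mem_cons_of_mem _ hy.1, hy.2⟩
      · rintro (hy | ⟨hy1, hy2⟩)
        · exact Or.inl (Or.inl hy)
        · rcases List.mem_cons.mp hy1 with rfl | hy1
          · exact Or.inl (Or.inr rfl)
          · exact Or.inr ⟨hy1, hy2⟩
    · simp only [h]
      have ha : a ∉ set2 := fun hm => h ((PySem.Set.contains_iff _ _).mpr hm)
      constructor
      · rintro (hy | hy)
        · exact Or.inl hy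
        · exact Or.inr ⟨List.mem_cons_of_mem _ hy.1, hy.2⟩
      · rintro (hy | ⟨hy1, hy2⟩)
        · exact Or.inl hy
        · rcases List.mem_cons.mp hy1 with rfl | hy1
          · exact absurd hy2 ha
          · exact Or.inr ⟨hy1, hy2⟩


-- ===== VERDICT (by name: the statement is the Claim_ definition above) =====
theorem remove_all_item_present_in_other_set_spec : Claim_equal_remove_all_item_present_in_other_set := by
  intro set1 set2 _
  unfold Spec_remove_all_item_present_in_other_set
  unfold remove_all_item_present_in_other_set remove_all_item_present_in_other_set_alt
  rw [foldl_removeD, foldl_discard]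
  apply List.filter_congr
  intro y hy
  congr 1
  simp only [List.contains_eq_mem, decide_eq_decide]
  rw [mem_tempFold]
  simp [PySem.Set.empty, hy]
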